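-- pv_equiv track=rewrite | github.com/PrincetonUniversity/job_defense_shield | src/job_defense_shield/utils.py | add_dividers
-- ===== SOURCE A (Python) =====
-- def add_dividers(df_str: str,
--                  title: str="",
--                  pre: str="\n\n\n",
--                  units_row: bool=False,
--                  clusters: bool=False) -> str:
--     """Add horizontal dividers to the output tables."""
--     rows = df_str.split("\n")
--     width = max([len(row) for row in rows] + [len(title)])
--     heading = title.center(width)
--     divider = "-" * width
--     divider_half = "- " * (width // 2)
--     if title and not units_row:
--         rows.insert(0, heading)
--         rows.insert(1, divider)
--         rows.insert(3, divider)
--         if clusters: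
--             cluster_change = []
--             prev = rows[4].split()[0]
--             for i, row in enumerate(rows[4:]):
--                 curr = row.split()[0]
--                 if curr != prev:
--                     cluster_change.append(i + 4)
--                     prev = curr
--             for i, idx in enumerate(cluster_change):
--                rows.insert(idx + i, divider_half)
--     elif title and units_row:
--         rows.insert(0, heading)
--         rows.insert(1, divider)
--         rows.insert(4, divider)
--     else:
--         rows.insert(0, divider)
--         rows.insert(2, divider)
--     rows.append(divider)
--     return pre + "\n".join(rows) + "\n"
-- ===== SOURCE B (Python) =====
-- def add_dividers(df_str: str,
--                  title: str="",
--                  pre: str="\n\n\n",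
--                  units_row: bool=False,
--                  clusters: bool=False) -> str:
--     """Add horizontal dividers to the output tables (single forward-building pass)."""
--     rows = df_str.split("\n")
--     width = max([len(row) for row in rows] + [len(title)])
--     divider = "-" * width
--     if title and not units_row:
--         out = [title.center(width), divider, rows[0], divider]
--         if clusters:
--             divider_half = "- " * (width // 2)
--             prev = rows[1].split()[0]
--             out.append(rows[1])
--             for row in rows[2:]:
--                 curr = row.split()[0]
--                 if curr != prev:
--                     out.append(divider_half)
--                     prev = curr
--                 out.append(row)
--         else:
--             out.extend(rows[1:])
--     elif title and units_row:
--         out = [title.center(width), divider, *rows[:2], divider, *rows[2:]]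
--     else:
--         out = [divider, rows[0], divider, *rows[1:]]
--     out.append(divider)
--     return pre + "\n".join(out) + "\n"
-- ===== Notes on version B (the rewrite author's own statement) =====
-- stated objective: simpler
-- what changed: The clusters branch's two passes (collect boundary indices into cluster_change, then re-insert divider_half at idx+i with a running offset) are replaced by one forward pass that appends divider_half directly before each row whose first token changes, and the three positional list.insert calls become direct construction of the output list.
import Mathlib
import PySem

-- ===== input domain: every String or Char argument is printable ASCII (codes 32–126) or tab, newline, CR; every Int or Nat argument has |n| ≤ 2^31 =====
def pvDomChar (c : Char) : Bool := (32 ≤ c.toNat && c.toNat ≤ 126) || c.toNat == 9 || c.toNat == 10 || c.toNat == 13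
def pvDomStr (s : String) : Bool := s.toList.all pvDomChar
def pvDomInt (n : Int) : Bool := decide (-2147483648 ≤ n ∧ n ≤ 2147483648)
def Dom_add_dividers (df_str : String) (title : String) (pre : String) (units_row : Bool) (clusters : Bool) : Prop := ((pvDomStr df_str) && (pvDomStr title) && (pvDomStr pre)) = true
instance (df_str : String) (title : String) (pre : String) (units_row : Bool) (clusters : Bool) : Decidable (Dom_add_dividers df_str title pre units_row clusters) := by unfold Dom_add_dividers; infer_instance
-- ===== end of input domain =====

-- B replaces A's two-pass cluster handling (collect boundary indices, then re-insert with offsets)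
-- by a single forward pass that emits the half-divider directly before each row whose first token
-- changes (objective: simpler); return-value equivalence on Pre_ (neither program mutates its arguments).

-- hand port (no PySem primitive) of CPython's str.center(width) fill computation:
-- left margin = marg // 2 + (marg & width & 1); exact for any width and string.
def pvCenter (s : List Char) (w : Nat) : List Char :=
  if w ≤ s.length then s
  else
    let marg := w - s.length
    let left := marg / 2 + (marg &&& w &&& 1)
    List.replicate left ' ' ++ s ++ List.replicate (marg - left) ' '

-- row.split()[0], both Pythons' token of a row; Pre_ excludes rows whose split() is empty
-- (there Python raises IndexError), so the .headD default is never the value used.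
def pvTok (r : List Char) : List Char := (PySem.Chars.split₀ r).headD []

-- ===== PORT A =====
-- A's first cluster loop: enumerate(rows[4:]) collecting the absolute indices (i + 4, here the
-- running counter j) of rows whose first token differs from the previous one.
def pvCollectA : List (List Char) → Nat → List Char → List Nat
  | [], _, _ => []
  | r :: rs, j, prev =>
      let curr := pvTok r
      if curr ≠ prev then j :: pvCollectA rs (j + 1) curr
      else pvCollectA rs (j + 1) prev

-- A's second cluster loop: for i, idx in enumerate(cluster_change): rows.insert(idx + i, divider_half)
def pvInsertAllA (half : List Char) : List (List Char) → List Nat → Nat → List (List Char)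
  | rows, [], _ => rows
  | rows, idx :: rest, i =>
      pvInsertAllA half (PySem.List.insert rows ((idx + i : Nat) : Int) half) rest (i + 1)

def add_dividers (df_str : String) (title : String) (pre : String) (units_row : Bool) (clusters : Bool) : String :=
  let rows := PySem.Chars.splitOn df_str.toList ['\n']
  let width := ((rows.map List.length) ++ [title.toList.length]).foldl max 0
  let heading := pvCenter title.toList width
  let divider := List.replicate width '-'
  let dividerHalf := PySem.List.pyRepeat ['-', ' '] ((width / 2 : Nat) : Int)
  let rows2 :=
    if title.toList ≠ [] ∧ units_row = false then
      let r3 := PySem.List.insert (PySem.List.insert (PySem.List.insert rows 0 heading) 1 divider) 3 divider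
      if clusters = true then
        let prev := pvTok ((PySem.List.pyGet? r3 4).getD [])
        let cc := pvCollectA (PySem.List.slice r3 (some 4) none) 4 prev
        pvInsertAllA dividerHalf r3 cc 0
      else r3
    else if title.toList ≠ [] ∧ units_row = true then
      PySem.List.insert (PySem.List.insert (PySem.List.insert rows 0 heading) 1 divider) 4 divider
    else
      PySem.List.insert (PySem.List.insert rows 0 divider) 2 divider
  String.ofList (pre.toList ++ PySem.Chars.join ['\n'] (rows2 ++ [divider]) ++ ['\n'])

-- ===== PORT B =====
-- B's single cluster pass: emit half before each row whose token differs from the running prev.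
def pvTailB (half : List Char) : List (List Char) → List Char → List (List Char)
  | [], _ => []
  | r :: rs, prev =>
      let curr := pvTok r
      if curr ≠ prev then half :: r :: pvTailB half rs curr
      else r :: pvTailB half rs prev

def add_dividers_alt (df_str : String) (title : String) (pre : String) (units_row : Bool) (clusters : Bool) : String :=
  let rows := PySem.Chars.splitOn df_str.toList ['\n']
  let width := ((rows.map List.length) ++ [title.toList.length]).foldl max 0
  let divider := List.replicate width '-'
  let out :=
    if title.toList ≠ [] ∧ units_row = false then
      let head4 := [pvCenter title.toList width, divider, rows.headD [], divider]
      if clusters = true then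
        let half := PySem.List.pyRepeat ['-', ' '] ((width / 2 : Nat) : Int)
        let r1 := (PySem.List.pyGet? rows 1).getD []
        head4 ++ r1 :: pvTailB half (rows.drop 2) (pvTok r1)   -- rows[2:]
      else head4 ++ rows.drop 1                                 -- rows[1:]
    else if title.toList ≠ [] ∧ units_row = true then
      pvCenter title.toList width :: divider :: (rows.take 2 ++ divider :: rows.drop 2)
    else
      divider :: rows.headD [] :: divider :: rows.drop 1
  String.ofList (pre.toList ++ PySem.Chars.join ['\n'] (out ++ [divider]) ++ ['\n'])

-- ===== PRECONDITION & SPEC =====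
-- Pre_ excludes exactly the inputs on which Python A raises IndexError: in the clusters branch
-- (nonempty title, units_row false, clusters true) A reads rows[4] after three header inserts and
-- row.split()[0] of every data row, so df_str must split into at least two lines and every line
-- after the first must contain a non-whitespace token.
def Pre_add_dividers (df_str : String) (title : String) (pre : String) (units_row : Bool) (clusters : Bool) : Prop :=
  (title.toList ≠ [] ∧ units_row = false ∧ clusters = true) →
    (2 ≤ (PySem.Chars.splitOn df_str.toList ['\n']).length ∧
      ∀ r ∈ (PySem.Chars.splitOn df_str.toList ['\n']).drop 1, PySem.Chars.split₀ r ≠ [])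
instance (df_str : String) (title : String) (pre : String) (units_row : Bool) (clusters : Bool) : Decidable (Pre_add_dividers df_str title pre units_row clusters) := by unfold Pre_add_dividers; infer_instance

def pvWitness_add_dividers : String × String × String × Bool × Bool :=
  ("JobID  Cluster\n123  della\n456  della\n789  stellar", "Jobs", "\n\n\n", false, true)

def Spec_add_dividers (df_str : String) (title : String) (pre : String) (units_row : Bool) (clusters : Bool) (out : String) : Prop := out = add_dividers_alt df_str title pre units_row clusters
instance (df_str : String) (title : String) (pre : String) (units_row : Bool) (clusters : Bool) (out : String) : Decidable (Spec_add_dividers df_str title pre units_row clusters out) := by unfold Spec_add_dividers; infer_instance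

-- ===== CLAIM (what is proved, stated in full; the proofs are below) =====
def Claim_equal_add_dividers : Prop := ∀ (df_str : String) (title : String) (pre : String) (units_row : Bool) (clusters : Bool), Dom_add_dividers df_str title pre units_row clusters → Pre_add_dividers df_str title pre units_row clusters → Spec_add_dividers df_str title pre units_row clusters (add_dividers df_str title pre units_row clusters)

-- ===== LEMMAS AND PROOFS =====

-- Python list.insert at a nonnegative index (clamped to the length, as list.insert does).
theorem pv_insert_nat {α : Type} (xs : List α) (n : Nat) (x : α) :
    PySem.List.insert xs (n : Int) x = xs.take n ++ x :: xs.drop n := by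
  have h0 : ¬ ((n : Int) < 0) := by omega
  have h1 : (min (n : Int) (xs.length : Int)).toNat = min n xs.length := by omega
  simp only [PySem.List.insert, PySem.List.sliceIndices]
  rw [if_neg h0]
  norm_num
  rw [h1, ← List.take_eq_take_min, ← List.drop_eq_drop_min]

theorem pv_insert_at_len {α : Type} (P ds : List α) (x : α) (m : Nat) (hP : P.length = m) :
    PySem.List.insert (P ++ ds) (m : Int) x = P ++ x :: ds := by
  subst hP
  rw [pv_insert_nat, List.take_left' rfl, List.drop_left' rfl]

theorem pv_ins013 {α : Type} (h d x r0 : α) (rest : List α) :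
    PySem.List.insert (PySem.List.insert (PySem.List.insert (r0 :: rest) 0 h) 1 d) 3 x
      = h :: d :: r0 :: x :: rest := by
  rw [show (0:Int) = ((0:Nat):Int) from rfl, pv_insert_nat,
      show (1:Int) = ((1:Nat):Int) from rfl, pv_insert_nat,
      show (3:Int) = ((3:Nat):Int) from rfl, pv_insert_nat]
  simp

theorem pv_ins014 {α : Type} (h d x r0 : α) (rest : List α) :
    PySem.List.insert (PySem.List.insert (PySem.List.insert (r0 :: rest) 0 h) 1 d) 4 x
      = h :: d :: (r0 :: rest).take 2 ++ x :: (r0 :: rest).drop 2 := by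
  rw [show (0:Int) = ((0:Nat):Int) from rfl, pv_insert_nat,
      show (1:Int) = ((1:Nat):Int) from rfl, pv_insert_nat,
      show (4:Int) = ((4:Nat):Int) from rfl, pv_insert_nat]
  simp

theorem pv_ins02 {α : Type} (d x r0 : α) (rest : List α) :
    PySem.List.insert (PySem.List.insert (r0 :: rest) 0 d) 2 x = d :: r0 :: x :: rest := by
  rw [show (0:Int) = ((0:Nat):Int) from rfl, pv_insert_nat,
      show (2:Int) = ((2:Nat):Int) from rfl, pv_insert_nat]
  simp

-- splitOn never returns the empty list, so rows always has a first element.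
theorem pv_splitOn_go_ne_nil (sep : List Char) : ∀ (fuel : Nat) (l cur : List Char) (acc : List (List Char)),
    PySem.Chars.splitOn.go sep fuel l cur acc ≠ [] := by
  intro fuel
  induction fuel with
  | zero => intro l cur acc; simp [PySem.Chars.splitOn.go]
  | succ n ih =>
    intro l cur acc
    cases l with
    | nil => simp [PySem.Chars.splitOn.go]
    | cons c rest =>
      rw [PySem.Chars.splitOn.go]
      split_ifs <;> apply ih

theorem pv_splitOn_ne_nil (s sep : List Char) : PySem.Chars.splitOn s sep ≠ [] := by
  unfold PySem.Chars.splitOn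
  apply pv_splitOn_go_ne_nil

-- the heart: A's collect-then-insert-with-offset equals B's single interleaving pass,
-- for any prefix P whose length matches the running index j plus the insert offset k.
theorem pv_insertAll_collect (half : List Char) (ds : List (List Char)) :
    ∀ (prev : List Char) (P : List (List Char)) (j k : Nat), P.length = j + k →
      pvInsertAllA half (P ++ ds) (pvCollectA ds j prev) k = P ++ pvTailB half ds prev := by
  induction ds with
  | nil => intro prev P j k _; simp [pvCollectA, pvInsertAllA, pvTailB]
  | cons r rs ih =>
    intro prev P j k hP
    by_cases hc : pvTok r = prev
    · simp only [pvCollectA, pvTailB, hc, ne_eq, not_true_eq_false, if_false]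
      have : P ++ r :: rs = (P ++ [r]) ++ rs := by simp
      rw [this, ih prev (P ++ [r]) (j + 1) k (by simp [hP]; omega)]
      simp
    · simp only [pvCollectA, pvTailB, ne_eq, hc, not_false_eq_true, if_true]
      simp only [pvInsertAllA]
      rw [show P ++ r :: rs = P ++ r :: rs from rfl,
          pv_insert_at_len P (r :: rs) half (j + k) hP]
      have : P ++ half :: r :: rs = (P ++ [half, r]) ++ rs := by simp
      rw [this, ih (pvTok r) (P ++ [half, r]) (j + 1) (k + 1) (by simp [hP]; omega)]
      simp

-- ===== VERDICT (by name: the statement is the Claim_ definition above) =====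
theorem add_dividers_spec : Claim_equal_add_dividers := by
  unfold Claim_equal_add_dividers Spec_add_dividers
  intro df_str title pre units_row clusters _ hpre
  unfold add_dividers add_dividers_alt
  obtain ⟨r0, rest, hrows⟩ : ∃ r0 rest, PySem.Chars.splitOn df_str.toList ['\n'] = r0 :: rest := by
    cases h : PySem.Chars.splitOn df_str.toList ['\n'] with
    | nil => exact absurd h (pv_splitOn_ne_nil _ _)
    | cons a l => exact ⟨a, l, rfl⟩
  by_cases ht : title.toList = []
  · -- else branch on both sides
    simp only [hrows, ht, ne_eq, not_true_eq_false, false_and, if_false]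
    rw [pv_ins02]
    simp
  · by_cases hu : units_row = true
    · -- title and units_row
      simp only [hrows, ht, hu, ne_eq, not_false_eq_true, true_and, Bool.true_eq_false,
        if_false, if_true]
      rw [pv_ins014]
      simp
    · -- title and not units_row
      have hu' : units_row = false := by cases units_row <;> simp_all
      by_cases hc : clusters = true
      · -- clusters: the interesting case
        obtain ⟨d0, ds, hrest⟩ : ∃ d0 ds, rest = d0 :: ds := by
          have h2 := (hpre ⟨ht, hu', hc⟩).1
          rw [hrows] at h2
          cases rest with
          | nil => simp at h2
          | cons a l => exact ⟨a, l, rfl⟩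
        simp only [hrows, hrest, ht, hu', hc, ne_eq, not_false_eq_true, true_and,
          Bool.false_eq_true, if_false, if_true]
        rw [pv_ins013]
        have hget : ∀ (a b c d e : List Char) (l : List (List Char)),
            PySem.List.pyGet? (a :: b :: c :: d :: e :: l) (4 : Int) = some e := by
          intro a b c d e l
          simp [PySem.List.pyGet?, PySem.List.pyIdx?]
          rw [if_pos (by omega)]
          simp
        have hslice : ∀ (a b c d e : List Char) (l : List (List Char)),
            PySem.List.slice (a :: b :: c :: d :: e :: l) (some 4) none = e :: l := by
          intro a b c d e l
          rw [show (a :: b :: c :: d :: e :: l) = [a, b, c, d] ++ (e :: l) from rfl]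
          rw [PySem.List.slice_from] <;> simp
        rw [hget, hslice]
        simp only [Option.getD_some]
        -- first iteration of A's collect loop: curr = prev, no boundary recorded
        have hcoll : ∀ (e : List Char) (l : List (List Char)),
            pvCollectA (e :: l) 4 (pvTok e) = pvCollectA l 5 (pvTok e) := by
          intro e l; simp [pvCollectA]
        rw [hcoll]
        have hmain : ∀ (a b c d e : List Char) (l : List (List Char)) (half : List Char),
            pvInsertAllA half (a :: b :: c :: d :: e :: l) (pvCollectA l 5 (pvTok e)) 0
              = [a, b, c, d, e] ++ pvTailB half l (pvTok e) := by
          intro a b c d e l half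
          rw [show (a :: b :: c :: d :: e :: l) = [a, b, c, d, e] ++ l from rfl]
          exact pv_insertAll_collect half l (pvTok e) [a, b, c, d, e] 5 0 (by simp)
        rw [hmain]
        simp [PySem.List.pyGet?, PySem.List.pyIdx?]
      · -- no clusters
        have hc' : clusters = false := by cases clusters <;> simp_all
        simp only [hrows, ht, hu', hc', ne_eq, not_false_eq_true, true_and,
          Bool.false_eq_true, if_false, if_true]
        rw [pv_ins013]
        simp
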